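-- pv_equiv track=rewrite | github.com/BeatsOn-AI/FLPFile_Tokenization | implementations.py | find_closest_midi_match
-- ===== SOURCE A (Python) =====
-- def find_closest_midi_match(instrument_list, midi_map):
--     # Initialize the result dictionary
--     result = {}
--
--     # Normalize the names for matching (lowercase and removing extra spaces)
--     nones = 0
--     norm_midi_map = [el.strip().lower() for el in midi_map]
--     all = 0
--     # Iterate through each item in the provided list
--     for instrument in instrument_list:
--         all += 1
--         # Normalize the input instrument for matching
--         normalized_instrument = instrument.strip().lower()
--         # Attempt to find the closest match
--         closest_match = None
--         for key in norm_midi_map: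
--             if key in normalized_instrument:
--                 closest_match = key
--                 break
--
--         # Add the match to the result dictionary
--         if closest_match != None:
--             result[instrument] = closest_match
--         else:
--             result[instrument] = "nothing"
--             nones += 1
--     return result
-- ===== SOURCE B (Python) =====
-- def find_closest_midi_match(instrument_list, midi_map):
--     # Key-major strategy: walk the midi keys in priority order and assign each
--     # key to every remaining (still unmatched, deduplicated) instrument whose
--     # normalized name contains it; matched instruments leave the pool at once.
--     remaining = [(inst, inst.strip().lower()) for inst in dict.fromkeys(instrument_list)]
--     assigned = {}
--     for key in midi_map:
--         if not remaining:
--             break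
--         k = key.strip().lower()
--         still = []
--         for inst, text in remaining:
--             if k in text:
--                 assigned[inst] = k
--             else:
--                 still.append((inst, text))
--         remaining = still
--     return {inst: assigned.get(inst, "nothing") for inst in instrument_list}
-- ===== Notes on version B (the rewrite author's own statement) =====
-- stated objective: alternative
-- what changed: Inverts the loop nesting: instead of scanning the key list per instrument with an early break, B walks the midi keys once in priority order and greedily assigns each key to every instrument in a shrinking pool of deduplicated, still-unmatched instruments, then reads the assignment off in instrument order.
import Mathlib
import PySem

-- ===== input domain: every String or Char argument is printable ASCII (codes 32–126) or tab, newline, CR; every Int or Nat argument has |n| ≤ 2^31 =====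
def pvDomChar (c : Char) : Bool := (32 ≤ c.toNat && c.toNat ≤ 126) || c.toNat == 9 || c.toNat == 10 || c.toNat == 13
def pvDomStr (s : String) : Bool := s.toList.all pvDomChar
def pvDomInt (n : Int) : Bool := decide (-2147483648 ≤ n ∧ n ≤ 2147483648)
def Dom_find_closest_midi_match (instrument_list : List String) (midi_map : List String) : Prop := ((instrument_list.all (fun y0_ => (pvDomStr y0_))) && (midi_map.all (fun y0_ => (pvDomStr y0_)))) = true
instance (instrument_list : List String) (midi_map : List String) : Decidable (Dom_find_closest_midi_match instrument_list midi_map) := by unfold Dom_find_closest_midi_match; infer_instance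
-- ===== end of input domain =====

-- B inverts the loop nesting: key-major greedy assignment over a shrinking pool of deduplicated instruments, instead of a per-instrument scan of the keys.

-- ===== PORT A =====
def find_closest_midi_match (instrument_list : List String) (midi_map : List String) : List (String × String) :=
  let norm_midi_map := midi_map.map (fun el => PySem.Str.lower (PySem.Str.strip el))
  let st := instrument_list.foldl (fun (s : PySem.Dict String String × Int × Int) instrument =>
      let allc := s.2.2 + 1
      let normalized_instrument := PySem.Str.lower (PySem.Str.strip instrument)
      let closest_match := norm_midi_map.find? (fun key => PySem.Str.isIn key normalized_instrument)
      match closest_match with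
      | some k => (s.1.insert instrument k, s.2.1, allc)
      | none   => (s.1.insert instrument "nothing", s.2.1 + 1, allc))
    (PySem.Dict.empty, 0, 0)
  st.1.items

-- ===== PORT B =====
def find_closest_midi_match_alt (instrument_list : List String) (midi_map : List String) : List (String × String) :=
  let remaining := (PySem.List.dedup instrument_list).map
    (fun inst => (inst, PySem.Str.lower (PySem.Str.strip inst)))
  -- the 'break' when the pool is empty is ported as the guard skipping the remaining keys
  let st := midi_map.foldl (fun (st : PySem.Dict String String × List (String × String)) key =>
      if st.2.isEmpty then st
      else
        let k := PySem.Str.lower (PySem.Str.strip key)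
        st.2.foldl (fun (s : PySem.Dict String String × List (String × String)) p =>
          if PySem.Str.isIn k p.2 then (s.1.insert p.1 k, s.2) else (s.1, s.2 ++ [p]))
          (st.1, []))
    (PySem.Dict.empty, remaining)
  let assigned := st.1
  (instrument_list.foldl (fun (r : PySem.Dict String String) inst =>
      r.insert inst (assigned.getD inst "nothing")) PySem.Dict.empty).items

-- ===== PRECONDITION & SPEC =====
def Spec_find_closest_midi_match (instrument_list : List String) (midi_map : List String) (out : List (String × String)) : Prop := out = find_closest_midi_match_alt instrument_list midi_map
instance (instrument_list : List String) (midi_map : List String) (out : List (String × String)) : Decidable (Spec_find_closest_midi_match instrument_list midi_map out) := by unfold Spec_find_closest_midi_match; infer_instance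

-- ===== CLAIM (what is proved, stated in full; the proofs are below) =====
def Claim_equal_find_closest_midi_match : Prop := ∀ (instrument_list : List String) (midi_map : List String), Dom_find_closest_midi_match instrument_list midi_map → Spec_find_closest_midi_match instrument_list midi_map (find_closest_midi_match instrument_list midi_map)

-- ===== LEMMAS AND PROOFS =====

-- A's loop, projected to its dictionary: the two counters do not feed the result
lemma pv_fstA (keys : List String) (p : String → String → Bool) :
    ∀ (il : List String) (d : PySem.Dict String String) (a b : Int),
    (il.foldl (fun (s : PySem.Dict String String × Int × Int) instrument =>
      match keys.find? (fun key => p key instrument) with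
      | some k => (s.1.insert instrument k, s.2.1, s.2.2 + 1)
      | none   => (s.1.insert instrument "nothing", s.2.1 + 1, s.2.2 + 1)) (d, a, b)).1
    = il.foldl (fun (d : PySem.Dict String String) instrument =>
        d.insert instrument ((keys.find? (fun key => p key instrument)).getD "nothing")) d := by
  intro il
  induction il with
  | nil => intro d a b; rfl
  | cons j rest ih =>
    intro d a b
    simp only [List.foldl_cons]
    cases hf : keys.find? (fun key => p key j) with
    | some k => exact ih _ _ _
    | none => exact ih _ _ _

-- one pass of B over the pool splits into its two accumulators
lemma pv_pass (k : String) (q : String → Bool) :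
    ∀ (ps : List (String × String)) (d : PySem.Dict String String) (acc : List (String × String)),
    ps.foldl (fun (s : PySem.Dict String String × List (String × String)) p =>
        if q p.2 then (s.1.insert p.1 k, s.2) else (s.1, s.2 ++ [p])) (d, acc)
    = (ps.foldl (fun (d : PySem.Dict String String) p => if q p.2 then d.insert p.1 k else d) d,
       acc ++ ps.filter (fun p => !q p.2)) := by
  intro ps
  induction ps with
  | nil => intro d acc; simp
  | cons p ps' ih =>
    intro d acc
    simp only [List.foldl_cons]
    by_cases hq : q p.2 = true
    · rw [if_pos hq, ih, if_pos hq]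
      simp [hq]
    · have hq' : q p.2 = false := by simpa using hq
      rw [if_neg hq, ih, if_neg hq]
      simp [hq']

-- the dictionary component of one pass, at one lookup
lemma pv_pass_get (k : String) (q : String → Bool) (x : String) :
    ∀ (ps : List (String × String)) (d : PySem.Dict String String),
    (ps.foldl (fun (d : PySem.Dict String String) p => if q p.2 then d.insert p.1 k else d) d).get? x
    = if ps.any (fun p => x == p.1 && q p.2) then some k else d.get? x := by
  intro ps
  induction ps with
  | nil => intro d; simp
  | cons p ps' ih =>
    intro d
    simp only [List.foldl_cons, List.any_cons]
    by_cases hq : q p.2 = true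
    · rw [if_pos hq, ih, PySem.Dict.get?_insert]
      by_cases hx : x = p.1
      · by_cases ha : ps'.any (fun p' => x == p'.1 && q p'.2)
        · simp [ha]
        · simp [hx, hq]
      · have hbe : (x == p.1) = false := by simpa using hx
        simp only [hbe, Bool.false_and, Bool.false_or, if_neg hx]
    · have hq' : q p.2 = false := by simpa using hq
      rw [if_neg hq, ih]
      simp only [hq', Bool.and_false, Bool.false_or]

-- B's key loop: each pooled instrument ends up bound to its first matching key; others are untouched
lemma pv_main (nf : String → String) (C : String → String → Bool) :
    ∀ (mm : List String) (d : PySem.Dict String String) (ps : List (String × String)),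
    (ps.map Prod.fst).Nodup → (∀ p ∈ ps, d.get? p.1 = none) →
    (∀ p ∈ ps,
      (mm.foldl (fun (st : PySem.Dict String String × List (String × String)) key =>
        if st.2.isEmpty then st
        else st.2.foldl (fun (s : PySem.Dict String String × List (String × String)) p =>
          if C (nf key) p.2 then (s.1.insert p.1 (nf key), s.2) else (s.1, s.2 ++ [p]))
          (st.1, [])) (d, ps)).1.get? p.1
      = (mm.map nf).find? (fun k => C k p.2))
    ∧ (∀ x, x ∉ ps.map Prod.fst →
      (mm.foldl (fun (st : PySem.Dict String String × List (String × String)) key =>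
        if st.2.isEmpty then st
        else st.2.foldl (fun (s : PySem.Dict String String × List (String × String)) p =>
          if C (nf key) p.2 then (s.1.insert p.1 (nf key), s.2) else (s.1, s.2 ++ [p]))
          (st.1, [])) (d, ps)).1.get? x
      = d.get? x) := by
  intro mm
  induction mm with
  | nil =>
    intro d ps _ hnone
    refine ⟨fun p hp => ?_, fun x _ => rfl⟩
    simpa using hnone p hp
  | cons key rest ih =>
    intro d ps hnodup hnone
    by_cases hemp : ps.isEmpty
    · have hps : ps = [] := by simpa [List.isEmpty_iff] using hemp
      subst hps
      simp only [List.foldl_cons]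
      obtain ⟨ih1, ih2⟩ := ih d [] (by simp) (by simp)
      exact ⟨fun p hp => absurd hp (List.not_mem_nil), fun x _ => ih2 x (by simp)⟩
    · simp only [List.foldl_cons, if_neg hemp, List.map_cons, List.find?_cons]
      rw [pv_pass (nf key) (fun t => C (nf key) t) ps d []]
      simp only [List.nil_append]
      set d' := ps.foldl (fun (d : PySem.Dict String String) p =>
        if C (nf key) p.2 then d.insert p.1 (nf key) else d) d with hd'
      set still := ps.filter (fun p => !C (nf key) p.2) with hstill
      have hmemstill : ∀ p, p ∈ still ↔ p ∈ ps ∧ C (nf key) p.2 = false := by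
        intro p; simp [hstill, List.mem_filter]
      have hsub : (still.map Prod.fst).Sublist (ps.map Prod.fst) :=
        List.Sublist.map Prod.fst List.filter_sublist
      have hnodup' : (still.map Prod.fst).Nodup := hnodup.sublist hsub
      have hinj := List.inj_on_of_nodup_map hnodup
      have hget : ∀ x, d'.get? x
          = if ps.any (fun p => x == p.1 && C (nf key) p.2) then some (nf key) else d.get? x := by
        intro x; exact pv_pass_get (nf key) (fun t => C (nf key) t) x ps d
      have hnone' : ∀ p ∈ still, d'.get? p.1 = none := by
        intro p hp
        obtain ⟨hps, hC⟩ := (hmemstill p).mp hp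
        have hany : ps.any (fun p' => p.1 == p'.1 && C (nf key) p'.2) = false := by
          by_contra h
          obtain ⟨p', hp', hcond⟩ := List.any_eq_true.mp (Bool.of_not_eq_false h)
          obtain ⟨he, hC'⟩ := Bool.and_eq_true_iff.mp hcond
          have heq : p.1 = p'.1 := by simpa using he
          have : p = p' := hinj hps hp' heq
          rw [← this] at hC'; rw [hC] at hC'; exact absurd hC' (by simp)
        rw [hget p.1, hany]
        simpa using hnone p hps
      obtain ⟨ih1, ih2⟩ := ih d' still hnodup' hnone'
      constructor
      · intro p hp
        by_cases hC : C (nf key) p.2 = true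
        · have hnotin : p.1 ∉ still.map Prod.fst := by
            intro hmem
            obtain ⟨p'', hp'', he⟩ := List.mem_map.mp hmem
            obtain ⟨hps'', hC''⟩ := (hmemstill p'').mp hp''
            have : p'' = p := hinj hps'' hp he
            rw [this] at hC''; rw [hC] at hC''; exact absurd hC'' (by simp)
          rw [ih2 p.1 hnotin, hget p.1]
          have hany : ps.any (fun p' => p.1 == p'.1 && C (nf key) p'.2) = true :=
            List.any_eq_true.mpr ⟨p, hp, by simp [hC]⟩
          rw [hany]
          simp [hC]
        · have hC' : C (nf key) p.2 = false := by simpa using hC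
          have hpst : p ∈ still := (hmemstill p).mpr ⟨hp, hC'⟩
          rw [ih1 p hpst]
          simp [hC']
      · intro x hx
        have hx' : x ∉ still.map Prod.fst := fun h => hx (hsub.mem h)
        rw [ih2 x hx', hget x]
        have hany : ps.any (fun p => x == p.1 && C (nf key) p.2) = false := by
          by_contra h
          obtain ⟨p', hp', hcond⟩ := List.any_eq_true.mp (Bool.of_not_eq_false h)
          obtain ⟨he, _⟩ := Bool.and_eq_true_iff.mp hcond
          have hx2 : x = p'.1 := by simpa using he
          have hm : p'.1 ∈ ps.map Prod.fst := List.mem_map.mpr ⟨p', hp', rfl⟩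
          exact hx (by rw [hx2]; exact hm)
        rw [hany]
        simp

-- ===== VERDICT (by name: the statement is the Claim_ definition above) =====
theorem find_closest_midi_match_spec : Claim_equal_find_closest_midi_match := by
  intro il mm _
  show find_closest_midi_match il mm = find_closest_midi_match_alt il mm
  unfold find_closest_midi_match find_closest_midi_match_alt
  simp only []
  rw [pv_fstA (mm.map fun el => PySem.Str.lower (PySem.Str.strip el))
      (fun key i => PySem.Str.isIn key (PySem.Str.lower (PySem.Str.strip i)))]
  apply congrArg PySem.Dict.items
  apply PySem.List.foldl_congr_mem'
  intro i hi r
  have hnod : (((PySem.List.dedup il).map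
      (fun inst => (inst, PySem.Str.lower (PySem.Str.strip inst)))).map Prod.fst).Nodup := by
    have hcomp : (Prod.fst ∘ fun inst : String => (inst, PySem.Str.lower (PySem.Str.strip inst))) = id := by
      funext s; rfl
    have h1 := PySem.List.nodup_dedup il
    simp only [List.map_map, hcomp, List.map_id, PySem.List.dedup_eq_ofList] at h1 ⊢
    exact h1
  have hmain := (pv_main (fun s => PySem.Str.lower (PySem.Str.strip s)) PySem.Str.isIn mm
      PySem.Dict.empty
      ((PySem.List.dedup il).map (fun inst => (inst, PySem.Str.lower (PySem.Str.strip inst))))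
      hnod (by intro p _; simp)).1
  have hp : (i, PySem.Str.lower (PySem.Str.strip i)) ∈
      (PySem.List.dedup il).map (fun inst => (inst, PySem.Str.lower (PySem.Str.strip inst))) :=
    List.mem_map.mpr ⟨i, (PySem.List.mem_dedup il i).mpr hi, rfl⟩
  have h := hmain _ hp
  beta_reduce at h
  simp only [PySem.Dict.getD_eq_get?_getD]
  rw [h]
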